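-- pv_equiv track=rewrite | github.com/arunavanag591/COSMOS | odor_stat_calculations.py | get_index_nowhiff
-- ===== SOURCE A (Python) =====
-- from itertools import groupby
-- from operator import itemgetter
--
-- def get_index_nowhiff(data,th):
--     idx = []
--     for i in range(len(data)):
--         if (data[i]<th):
--             idx.append(i)
--
--     index = []
--     for k, g in groupby(enumerate(idx),lambda ix : ix[0] - ix[1]):
--         index.append((list((map(itemgetter(1), g)))))
--     return index
-- ===== SOURCE B (Python) =====
-- def get_index_nowhiff(data, th):
--     result = []
--     run = []
--     prev = None
--     for i, x in enumerate(data):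
--         if x < th:
--             if prev is not None and i == prev + 1:
--                 run.append(i)
--             else:
--                 if run:
--                     result.append(run)
--                 run = [i]
--             prev = i
--     if run:
--         result.append(run)
--     return result
-- ===== Notes on version B (the rewrite author's own statement) =====
-- stated objective: simpler
-- what changed: Replaces the two-phase filter-then-groupby(enumerate, i-idx key) pipeline with one streaming pass over the data that maintains the current run and previous below-threshold index directly.
import Mathlib
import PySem

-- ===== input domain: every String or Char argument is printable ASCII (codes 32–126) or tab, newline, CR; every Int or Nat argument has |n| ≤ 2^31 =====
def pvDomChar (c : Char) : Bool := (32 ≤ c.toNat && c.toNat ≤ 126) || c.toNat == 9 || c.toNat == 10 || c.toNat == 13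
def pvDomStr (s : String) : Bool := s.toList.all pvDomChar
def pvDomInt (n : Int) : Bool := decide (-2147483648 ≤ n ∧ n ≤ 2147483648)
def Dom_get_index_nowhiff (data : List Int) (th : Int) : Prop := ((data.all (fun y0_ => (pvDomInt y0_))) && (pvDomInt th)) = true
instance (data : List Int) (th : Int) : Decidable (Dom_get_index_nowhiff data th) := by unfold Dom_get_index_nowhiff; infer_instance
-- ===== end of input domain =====

-- B is a single streaming pass (result / current run / previous index) replacing A's
-- filter-then-groupby pipeline; objective: simpler. Equal return value on all inputs.

-- ===== PORT A =====
-- first loop: idx of all i with data[i] < th (loop over range(len(data)), counter i)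
def pvGetIdx : List Int → Int → Int → List Int
  | [], _, _ => []
  | x :: xs, i, th => (if x < th then [i] else []) ++ pvGetIdx xs (i + 1) th

-- enumerate(idx) with running position
def pvEnum : Int → List Int → List (Int × Int)
  | _, [] => []
  | p, v :: rest => (p, v) :: pvEnum (p + 1) rest

-- itertools.groupby(pairs, key = pos - val), each group mapped to its values
def pvGbAux (k : Int) (cur : List Int) : List (Int × Int) → List (List Int)
  | [] => [cur]
  | (p, v) :: rest =>
      if p - v == k then pvGbAux k (cur ++ [v]) rest
      else cur :: pvGbAux (p - v) [v] rest

def get_index_nowhiff (data : List Int) (th : Int) : List (List Int) :=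
  let idx := pvGetIdx data 0 th
  match pvEnum 0 idx with
  | [] => []
  | (p, v) :: rest => pvGbAux (p - v) [v] rest

-- ===== PORT B =====
-- single pass: result list, current run, previous below-threshold index
def pvAltLoop (th : Int) : List Int → Int → List (List Int) → List Int → Option Int → List (List Int)
  | [], _, res, run, _ => if run.isEmpty then res else res ++ [run]
  | x :: xs, i, res, run, prev =>
      if x < th then
        match prev with
        | some p =>
            if i == p + 1 then pvAltLoop th xs (i + 1) res (run ++ [i]) (some i)
            else pvAltLoop th xs (i + 1) (if run.isEmpty then res else res ++ [run]) [i] (some i)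
        | none => pvAltLoop th xs (i + 1) (if run.isEmpty then res else res ++ [run]) [i] (some i)
      else pvAltLoop th xs (i + 1) res run prev

def get_index_nowhiff_alt (data : List Int) (th : Int) : List (List Int) :=
  pvAltLoop th data 0 [] [] none

-- ===== PRECONDITION & SPEC =====
def Spec_get_index_nowhiff (data : List Int) (th : Int) (out : List (List Int)) : Prop := out = get_index_nowhiff_alt data th
instance (data : List Int) (th : Int) (out : List (List Int)) : Decidable (Spec_get_index_nowhiff data th out) := by unfold Spec_get_index_nowhiff; infer_instance

-- ===== CLAIM (what is proved, stated in full; the proofs are below) =====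
def Claim_equal_get_index_nowhiff : Prop := ∀ (data : List Int) (th : Int), Dom_get_index_nowhiff data th → Spec_get_index_nowhiff data th (get_index_nowhiff data th)

-- ===== LEMMAS AND PROOFS =====

-- common characterisation: group maximal runs of consecutive integers
def pvGrpAux (last : Int) (cur : List Int) : List Int → List (List Int)
  | [] => [cur]
  | v :: rest => if v == last + 1 then pvGrpAux v (cur ++ [v]) rest
                 else cur :: pvGrpAux v [v] rest

def pvGrp : List Int → List (List Int)
  | [] => []
  | v :: rest => pvGrpAux v [v] rest

lemma pvGbAux_eq_grpAux (vals : List Int) : ∀ (p last : Int) (cur : List Int),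
    pvGbAux (p - last - 1) cur (pvEnum p vals) = pvGrpAux last cur vals := by
  induction vals with
  | nil => intro p last cur; simp [pvEnum, pvGbAux, pvGrpAux]
  | cons v rest ih =>
      intro p last cur
      simp only [pvEnum, pvGbAux, pvGrpAux]
      by_cases h : v = last + 1
      · have hk : (p - v == p - last - 1) = true := by simp only [beq_iff_eq]; omega
        have hv : (v == last + 1) = true := by simp [h]
        simp only [hk, hv, if_true]
        have : p - last - 1 = (p + 1) - v - 1 := by omega
        rw [this, ih]
      · have hk : (p - v == p - last - 1) = false := by simp only [beq_eq_false_iff_ne]; omega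
        have hv : (v == last + 1) = false := by simp [h]
        simp only [hk, hv, Bool.false_eq_true, if_false]
        have : p - v = (p + 1) - v - 1 := by omega
        rw [this, ih]

lemma portA_eq_grp (data : List Int) (th : Int) :
    get_index_nowhiff data th = pvGrp (pvGetIdx data 0 th) := by
  unfold get_index_nowhiff
  cases h : pvGetIdx data 0 th with
  | nil => simp [pvEnum, pvGrp]
  | cons v rest =>
      simp only [pvEnum, pvGrp]
      have : (0 : Int) - v = (0 + 1) - v - 1 := by omega
      rw [this, pvGbAux_eq_grpAux]

lemma pvGetIdx_skip (xs : List Int) (x i th : Int) (h : ¬ x < th) :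
    pvGetIdx (x :: xs) i th = pvGetIdx xs (i + 1) th := by
  simp [pvGetIdx, h]

lemma pvGetIdx_hit (xs : List Int) (x i th : Int) (h : x < th) :
    pvGetIdx (x :: xs) i th = i :: pvGetIdx xs (i + 1) th := by
  simp [pvGetIdx, h]

lemma altLoop_some (th : Int) (xs : List Int) : ∀ (i : Int) (res : List (List Int))
    (run : List Int) (p : Int), run ≠ [] →
    pvAltLoop th xs i res run (some p) = res ++ pvGrpAux p run (pvGetIdx xs i th) := by
  induction xs with
  | nil => intro i res run p hrun; simp [pvAltLoop, pvGetIdx, pvGrpAux, List.isEmpty_iff, hrun]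
  | cons x xs ih =>
      intro i res run p hrun
      by_cases hx : x < th
      · rw [pvGetIdx_hit xs x i th hx]
        simp only [pvAltLoop, if_pos hx]
        by_cases hi : i = p + 1
        · have : (i == p + 1) = true := by simp [hi]
          rw [this]
          simp only [if_true, pvGrpAux, this]
          rw [ih (i + 1) res (run ++ [i]) i (by simp)]
        · have : (i == p + 1) = false := by simp [hi]
          rw [this]
          simp only [if_false, pvGrpAux, this, List.isEmpty_iff, hrun]
          rw [ih (i + 1) (res ++ [run]) [i] i (by simp)]
          simp
      · rw [pvGetIdx_skip xs x i th hx]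
        simp only [pvAltLoop, if_neg hx]
        exact ih (i + 1) res run p hrun

lemma altLoop_none (th : Int) (xs : List Int) : ∀ (i : Int) (res : List (List Int)),
    pvAltLoop th xs i res [] none = res ++ pvGrp (pvGetIdx xs i th) := by
  induction xs with
  | nil => intro i res; simp [pvAltLoop, pvGetIdx, pvGrp]
  | cons x xs ih =>
      intro i res
      by_cases hx : x < th
      · rw [pvGetIdx_hit xs x i th hx]
        simp only [pvAltLoop, if_pos hx, List.isEmpty_nil, if_true, pvGrp]
        exact altLoop_some th xs (i + 1) res [i] i (by simp)
      · rw [pvGetIdx_skip xs x i th hx]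
        simp only [pvAltLoop, if_neg hx]
        exact ih (i + 1) res

-- ===== VERDICT (by name: the statement is the Claim_ definition above) =====
theorem get_index_nowhiff_spec : Claim_equal_get_index_nowhiff := by
  intro data th _
  unfold Spec_get_index_nowhiff get_index_nowhiff_alt
  rw [portA_eq_grp, altLoop_none]
  simp
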